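-- pv_equiv track=rewrite | github.com/daniel-reich/ubiquitous-fiesta | HoFKikySJb4MebyYd_0.py | transform_matrix
-- ===== SOURCE A (Python) =====
-- def transform_matrix(lst):
--   lst2 = [[] * 1 for i in lst[0]]
--   for j in range(len(lst2)):
--     for k in range(len(lst)):
--       lst2[j].append(lst[k][j])
--   newmt = [[] * 1 for i in lst]
--   for l in range(len(lst)):
--     for m in range(len(lst2)):
--       newmt[l].append(sum(lst[l]) + sum(lst2[m]) - (2*lst[l][m]))
--   return newmt
-- ===== SOURCE B (Python) =====
-- def transform_matrix(lst):
--   w = len(lst[0])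
--   col_sums = [sum(row[j] for row in lst) for j in range(w)]
--   out = []
--   for row in lst:
--     rs = sum(row)
--     out.append([rs + col_sums[j] - 2 * row[j] for j in range(w)])
--   return out
-- ===== Notes on version B (the rewrite author's own statement) =====
-- stated objective: faster
-- what changed: precompute each column sum once and each row sum once per row instead of re-summing the row and a freshly built transposed column inside the inner loop
import Mathlib
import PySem

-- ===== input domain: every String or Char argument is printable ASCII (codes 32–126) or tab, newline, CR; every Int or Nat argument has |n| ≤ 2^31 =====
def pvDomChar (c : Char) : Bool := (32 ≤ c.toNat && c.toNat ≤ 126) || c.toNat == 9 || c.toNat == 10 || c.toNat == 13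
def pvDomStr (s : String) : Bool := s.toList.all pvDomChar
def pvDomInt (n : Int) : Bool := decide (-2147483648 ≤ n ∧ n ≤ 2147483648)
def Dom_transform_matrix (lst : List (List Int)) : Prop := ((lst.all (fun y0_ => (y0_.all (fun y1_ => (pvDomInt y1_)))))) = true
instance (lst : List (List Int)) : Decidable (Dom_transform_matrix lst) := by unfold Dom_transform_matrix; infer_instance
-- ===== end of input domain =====

-- B precomputes every column sum once and every row sum once per row, instead of A's
-- per-cell re-summation of the row and of a freshly built transposed column.

-- ===== PORT A =====
def transform_matrix (lst : List (List Int)) : List (List Int) :=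
  let lst2 := (List.range (PySem.List.pyGetD lst 0 []).length).map (fun (j : Nat) =>
    (List.range lst.length).foldl (fun col (k : Nat) =>
      col ++ [PySem.List.pyGetD (PySem.List.pyGetD lst (k : Int) []) (j : Int) 0]) [])
  (List.range lst.length).map (fun (l : Nat) =>
    (List.range lst2.length).foldl (fun row (m : Nat) =>
      row ++ [ (PySem.List.pyGetD lst (l : Int) []).sum
               + (PySem.List.pyGetD lst2 (m : Int) []).sum
               - 2 * PySem.List.pyGetD (PySem.List.pyGetD lst (l : Int) []) (m : Int) 0 ]) [])

-- ===== PORT B =====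
def transform_matrix_alt (lst : List (List Int)) : List (List Int) :=
  let w := (PySem.List.pyGetD lst 0 []).length
  let colSums := (List.range w).map (fun (j : Nat) =>
    (lst.map (fun row => PySem.List.pyGetD row (j : Int) 0)).sum)
  lst.foldl (fun out row =>
    let rs := row.sum
    out ++ [(List.range w).map (fun (j : Nat) =>
      rs + PySem.List.pyGetD colSums (j : Int) 0 - 2 * PySem.List.pyGetD row (j : Int) 0)]) []

-- ===== PRECONDITION & SPEC =====
-- Pre_ excludes exactly the inputs where Python A raises IndexError: the empty matrix
-- and matrices in which some row is shorter than the first row.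
def Pre_transform_matrix (lst : List (List Int)) : Prop :=
  lst ≠ [] ∧ ∀ r ∈ lst, (lst.headD []).length ≤ r.length
instance (lst : List (List Int)) : Decidable (Pre_transform_matrix lst) := by
  unfold Pre_transform_matrix; infer_instance
def pvWitness_transform_matrix : List (List Int) := [[1, 2], [3, 4]]
def Spec_transform_matrix (lst : List (List Int)) (out : List (List Int)) : Prop := out = transform_matrix_alt lst
instance (lst : List (List Int)) (out : List (List Int)) : Decidable (Spec_transform_matrix lst out) := by unfold Spec_transform_matrix; infer_instance

-- ===== CLAIM (what is proved, stated in full; the proofs are below) =====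
def Claim_equal_transform_matrix : Prop := ∀ (lst : List (List Int)), Dom_transform_matrix lst → Pre_transform_matrix lst → Spec_transform_matrix lst (transform_matrix lst)

-- ===== LEMMAS AND PROOFS =====

-- indexing a list at every position of range(len(..)) is just mapping over the list
lemma map_range_pyGetD {α β : Type} (lst : List α) (d : α) (f : α → β) :
    (List.range lst.length).map (fun (k : Nat) => f (PySem.List.pyGetD lst (k : Int) d)) = lst.map f := by
  apply List.ext_getElem
  · simp
  · intro i h1 h2
    simp only [List.length_map] at h2
    simp [List.getElem?_eq_getElem h2]

-- A's transposed matrix (the `lst2` of the port, as a named term)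
def pvColA (lst : List (List Int)) : List (List Int) :=
  (List.range (PySem.List.pyGetD lst 0 []).length).map (fun (j : Nat) =>
    (List.range lst.length).foldl (fun col (k : Nat) =>
      col ++ [PySem.List.pyGetD (PySem.List.pyGetD lst (k : Int) []) (j : Int) 0]) [])

-- B's column sums (the `colSums` of the port, as a named term)
def pvColSums (lst : List (List Int)) : List Int :=
  (List.range (PySem.List.pyGetD lst 0 []).length).map (fun (j : Nat) =>
    (lst.map (fun row => PySem.List.pyGetD row (j : Int) 0)).sum)

def pvBrow (lst : List (List Int)) (row : List Int) : List Int :=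
  (List.range (PySem.List.pyGetD lst 0 []).length).map (fun (j : Nat) =>
    row.sum + PySem.List.pyGetD (pvColSums lst) (j : Int) 0 - 2 * PySem.List.pyGetD row (j : Int) 0)

def pvArow (lst : List (List Int)) (l : Nat) : List Int :=
  (List.range (pvColA lst).length).map (fun (m : Nat) =>
    (PySem.List.pyGetD lst (l : Int) []).sum + (PySem.List.pyGetD (pvColA lst) (m : Int) []).sum
      - 2 * PySem.List.pyGetD (PySem.List.pyGetD lst (l : Int) []) (m : Int) 0)

-- the sum of A's freshly built column m equals B's precomputed column sum m
lemma col_mid (lst : List (List Int)) (m : Nat) (hm : m < (PySem.List.pyGetD lst 0 []).length) :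
    (PySem.List.pyGetD (pvColA lst) (m : Int) []).sum = PySem.List.pyGetD (pvColSums lst) (m : Int) 0 := by
  rw [PySem.List.pyGetD_natCast, PySem.List.pyGetD_natCast]
  unfold pvColA pvColSums
  rw [PySem.List.getD_map_range _ _ _ _ hm, PySem.List.getD_map_range _ _ _ _ hm]
  rw [PySem.List.foldl_append_singleton_eq_map, List.nil_append]
  exact congrArg List.sum (map_range_pyGetD lst [] (fun r => PySem.List.pyGetD r (m : Int) 0))

lemma transform_matrix_eq_alt (lst : List (List Int)) :
    transform_matrix lst = transform_matrix_alt lst := by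
  have hB : transform_matrix_alt lst = lst.map (pvBrow lst) :=
    (PySem.List.foldl_append_singleton_eq_map (pvBrow lst) lst []).trans (List.nil_append _)
  have hA : transform_matrix lst = (List.range lst.length).map (pvArow lst) :=
    List.map_congr_left (fun l _ =>
      (PySem.List.foldl_append_singleton_eq_map _ _ []).trans (List.nil_append _))
  rw [hA, hB, ← map_range_pyGetD lst [] (pvBrow lst)]
  apply List.map_congr_left
  intro l hl
  unfold pvArow pvBrow
  have hW : (pvColA lst).length = (PySem.List.pyGetD lst 0 []).length := by
    unfold pvColA; simp
  rw [hW]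
  apply List.map_congr_left
  intro m hm
  rw [col_mid lst m (List.mem_range.mp hm)]

-- ===== VERDICT (by name: the statement is the Claim_ definition above) =====
theorem transform_matrix_spec : Claim_equal_transform_matrix := by
  intro lst _ _
  exact transform_matrix_eq_alt lst
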